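-- pv_equiv track=rewrite | github.com/racek256/Purkynthon | src/backend/modules/sanitization.py | replace_final_return
-- ===== SOURCE A (Python) =====
-- def replace_final_return(text: str, replacement: str) -> str:
--     lines = text.split("\n")
--
--     last_idx = None
--     for i in range(len(lines) - 1, -1, -1):
--         if lines[i].strip() != "":
--             last_idx = i
--             break
--
--     if last_idx is None:
--         return text
--
--     line = lines[last_idx]
--
--     if line.startswith("return") and not line.startswith((" ", "\t")):
--         rest = line[len("return"):]
--         lines[last_idx] = replacement + rest
--
--     return "\n".join(lines)
-- ===== SOURCE B (Python) =====
-- def replace_final_return(text: str, replacement: str) -> str: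
--     body = text.rstrip()
--     if not body:
--         return text
--     start = body.rfind("\n") + 1          # start of the last non-blank line
--     end = text.find("\n", start)          # its end in the original text
--     if end == -1:
--         end = len(text)
--     if text[start:end].startswith("return"):
--         return text[:start] + replacement + text[start + 6:end] + text[end:]
--     return text
-- ===== Notes on version B (the rewrite author's own statement) =====
-- stated objective: alternative
-- what changed: Instead of splitting the text into a line list, scanning it backwards by index and rejoining, B computes character positions directly on the string (rstrip for the last non-whitespace, rfind/find for the line bounds) and splices the replacement in with four slices; it also drops A's redundant leading-space test.
import Mathlib
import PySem

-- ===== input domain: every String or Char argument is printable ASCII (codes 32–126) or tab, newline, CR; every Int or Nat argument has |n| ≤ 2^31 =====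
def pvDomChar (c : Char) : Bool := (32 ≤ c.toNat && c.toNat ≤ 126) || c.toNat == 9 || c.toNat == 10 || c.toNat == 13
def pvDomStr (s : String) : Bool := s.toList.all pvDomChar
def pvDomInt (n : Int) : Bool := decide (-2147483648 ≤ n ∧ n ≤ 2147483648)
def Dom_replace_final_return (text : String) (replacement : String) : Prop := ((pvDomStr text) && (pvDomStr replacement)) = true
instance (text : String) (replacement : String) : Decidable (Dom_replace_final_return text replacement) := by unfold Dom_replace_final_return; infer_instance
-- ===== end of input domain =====

-- B replaces A's split-into-lines / backward index scan / rejoin with direct index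
-- arithmetic on the string (rstrip + rfind + find + slices); return value only, no mutation.

-- ===== PORT A =====
-- the backward 'for i in range(len(lines)-1, -1, -1): … break' loop of A
def pvLastIdxLoop (lines : List (List Char)) : List Int → Option Int
  | [] => none
  | i :: rest =>
    if PySem.Chars.strip (PySem.List.pyGetD lines i []) ≠ [] then some i
    else pvLastIdxLoop lines rest

def replace_final_return (text : String) (replacement : String) : String :=
  let lines := PySem.Chars.splitOn text.toList ['\n']
  let last_idx := pvLastIdxLoop lines (PySem.List.pyRange (PySem.List.len lines - 1) (-1) (-1))
  last_idx.elim text (fun i =>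
    let line := PySem.List.pyGetD lines i []
    let lines' :=
      if PySem.Chars.startswith line "return".toList
          && !(PySem.Chars.startswith line " ".toList || PySem.Chars.startswith line "\t".toList) then
        let rest := PySem.List.slice line (some 6) none
        PySem.List.pySetD lines i (replacement.toList ++ rest)
      else lines
    String.ofList (PySem.Chars.join ['\n'] lines'))

-- ===== PORT B =====
def replace_final_return_alt (text : String) (replacement : String) : String :=
  let body := PySem.Chars.rstrip text.toList
  if body = [] then text
  else
    let start := PySem.Chars.rfind body ['\n'] + 1
    let end0 := PySem.Chars.findFrom text.toList ['\n'] start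
    let end1 := if end0 = -1 then PySem.List.len text.toList else end0
    if PySem.Chars.startswith (PySem.List.slice text.toList (some start) (some end1)) "return".toList then
      String.ofList (PySem.List.slice text.toList none (some start) ++ replacement.toList
        ++ PySem.List.slice text.toList (some (start + 6)) (some end1)
        ++ PySem.List.slice text.toList (some end1) none)
    else text

-- ===== PRECONDITION & SPEC =====
def Spec_replace_final_return (text : String) (replacement : String) (out : String) : Prop := out = replace_final_return_alt text replacement
instance (text : String) (replacement : String) (out : String) : Decidable (Spec_replace_final_return text replacement out) := by unfold Spec_replace_final_return; infer_instance

-- ===== CLAIM (what is proved, stated in full; the proofs are below) =====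
def Claim_equal_replace_final_return : Prop := ∀ (text : String) (replacement : String), Dom_replace_final_return text replacement → Spec_replace_final_return text replacement (replace_final_return text replacement)

-- ===== LEMMAS AND PROOFS =====

-- line splitter: structural-recursion model of text.split("\n")
def pvSpl : List Char → List (List Char)
  | [] => [[]]
  | a :: t =>
    if a = '\n' then [] :: pvSpl t
    else
      match pvSpl t with
      | [] => [[a]]
      | h :: r => (a :: h) :: r

theorem pvSpl_ne_nil (cs : List Char) : pvSpl cs ≠ [] := by
  cases cs with
  | nil => simp [pvSpl]
  | cons a t =>
    simp only [pvSpl]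
    split
    · simp
    · cases h : pvSpl t <;> simp

-- prepend x onto the head piece
def pvConsHead (x : List Char) : List (List Char) → List (List Char)
  | [] => [x]
  | h :: r => (x ++ h) :: r

theorem pvSplitOn_go (fuel : Nat) (l cur : List Char) (acc : List (List Char))
    (h : l.length < fuel) :
    PySem.Chars.splitOn.go ['\n'] fuel l cur acc
      = acc.reverse ++ pvConsHead cur.reverse (pvSpl l) := by
  induction fuel generalizing l cur acc with
  | zero => omega
  | succ fuel ih =>
    cases l with
    | nil =>
      simp [PySem.Chars.splitOn.go, pvSpl, pvConsHead]
    | cons a t =>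
      by_cases ha : a = '\n'
      · subst ha
        rw [PySem.Chars.splitOn.go]
        have hp : List.isPrefixOf ['\n'] ('\n' :: t) = true := by
          simp [List.isPrefixOf_iff_prefix]
        simp only [hp]
        rw [if_pos trivial]
        have hdrop : List.drop ['\n'].length ('\n' :: t) = t := rfl
        rw [hdrop, ih t [] (cur.reverse :: acc) (by simpa using Nat.lt_of_succ_lt_succ h)]
        have hch : pvConsHead [] (pvSpl t) = pvSpl t := by
          cases hsp : pvSpl t with
          | nil => exact absurd hsp (pvSpl_ne_nil t)
          | cons h r => simp [pvConsHead]
        simp only [List.reverse_nil] at *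
        rw [hch]
        have hsp2 : pvSpl ('\n' :: t) = [] :: pvSpl t := by simp [pvSpl]
        rw [hsp2]
        simp [pvConsHead]
      · rw [PySem.Chars.splitOn.go]
        have hp : List.isPrefixOf ['\n'] (a :: t) = false := by
          rw [Bool.eq_false_iff, ne_eq, List.isPrefixOf_iff_prefix]
          intro hc
          rcases List.cons_prefix_cons.mp hc with ⟨h1, -⟩
          exact ha h1.symm
        simp only [hp]
        rw [if_neg (by simp)]
        rw [ih t (a :: cur) acc (by simpa using Nat.lt_of_succ_lt_succ h)]
        cases hsp : pvSpl t with
        | nil => exact absurd hsp (pvSpl_ne_nil t)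
        | cons h r => simp [pvSpl, if_neg ha, hsp, pvConsHead]

theorem pvSplitOn_eq_spl (cs : List Char) :
    PySem.Chars.splitOn cs ['\n'] = pvSpl cs := by
  rw [PySem.Chars.splitOn, pvSplitOn_go (cs.length + 1) cs [] [] (by omega)]
  cases hsp : pvSpl cs with
  | nil => exact absurd hsp (pvSpl_ne_nil cs)
  | cons h r => simp [pvConsHead]

theorem pvSpl_no_nl (cs : List Char) (h : '\n' ∉ cs) : pvSpl cs = [cs] := by
  induction cs with
  | nil => rfl
  | cons a t ih =>
    have ha : a ≠ '\n' := fun hc => h (by simp [hc])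
    have ht : '\n' ∉ t := fun hc => h (by simp [hc])
    simp [pvSpl, if_neg ha, ih ht]

theorem pvSpl_append (x y : List Char) :
    pvSpl (x ++ '\n' :: y) = pvSpl x ++ pvSpl y := by
  induction x with
  | nil => simp [pvSpl]
  | cons a t ih =>
    by_cases ha : a = '\n'
    · subst ha; simp [pvSpl, ih]
    · simp only [List.cons_append, pvSpl, if_neg ha, ih]
      cases hsp : pvSpl t with
      | nil => exact absurd hsp (pvSpl_ne_nil t)
      | cons h r => simp

theorem pvMem_mem_spl {cs : List Char} {l : List Char} {a : Char}
    (hl : l ∈ pvSpl cs) (ha : a ∈ l) : a ∈ cs := by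
  induction cs generalizing l with
  | nil =>
    simp [pvSpl] at hl; subst hl; simp at ha
  | cons b t ih =>
    by_cases hb : b = '\n'
    · subst hb
      simp [pvSpl] at hl
      rcases hl with hl | hl
      · subst hl; simp at ha
      · exact List.mem_cons_of_mem _ (ih hl ha)
    · simp only [pvSpl, if_neg hb] at hl
      cases hsp : pvSpl t with
      | nil => exact absurd hsp (pvSpl_ne_nil t)
      | cons h r =>
        rw [hsp] at hl
        rcases List.mem_cons.mp hl with hl | hl
        · subst hl
          rcases List.mem_cons.mp ha with ha | ha
          · simp [ha]
          · exact List.mem_cons_of_mem _ (ih (by rw [hsp]; exact List.mem_cons_self) ha)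
        · exact List.mem_cons_of_mem _ (ih (by rw [hsp]; exact List.mem_cons_of_mem _ hl) ha)

theorem pvJoin_spl (cs : List Char) :
    PySem.Chars.join ['\n'] (pvSpl cs) = cs := by
  induction cs with
  | nil => simp [pvSpl, PySem.Chars.join, List.intercalate]
  | cons a t ih =>
    by_cases ha : a = '\n'
    · subst ha
      cases hsp : pvSpl t with
      | nil => exact absurd hsp (pvSpl_ne_nil t)
      | cons h r =>
        rw [hsp] at ih
        simp [pvSpl, hsp, PySem.Chars.join, List.intercalate, List.intersperse] at ih ⊢
        simpa using ih
    · simp only [pvSpl, if_neg ha]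
      cases hsp : pvSpl t with
      | nil => exact absurd hsp (pvSpl_ne_nil t)
      | cons h r =>
        rw [hsp] at ih
        cases r with
        | nil => simp_all [PySem.Chars.join, List.intercalate, List.intersperse]
        | cons h2 r2 => simp_all [PySem.Chars.join, List.intercalate, List.intersperse]

theorem pvJoin_append (A B : List (List Char)) (hA : A ≠ []) (hB : B ≠ []) :
    PySem.Chars.join ['\n'] (A ++ B)
      = PySem.Chars.join ['\n'] A ++ '\n' :: PySem.Chars.join ['\n'] B := by
  induction A with
  | nil => exact absurd rfl hA
  | cons x A' ih =>
    cases A' with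
    | nil =>
      cases B with
      | nil => exact absurd rfl hB
      | cons y B' => simp [PySem.Chars.join, List.intercalate, List.intersperse]
    | cons x2 A'' =>
      have := ih (by simp)
      simp [PySem.Chars.join, List.intercalate, List.intersperse] at this ⊢
      simpa using this

-- strip facts
theorem pvStrip_eq_nil (z : List Char) (h : ∀ a ∈ z, PySem.Chars.isspace a = true) :
    PySem.Chars.strip z = [] := by
  have h1 : PySem.Chars.lstrip z = [] := List.dropWhile_eq_nil_iff.mpr h
  simp [PySem.Chars.strip, h1, PySem.Chars.rstrip]

theorem pvMem_dropWhile {p : Char → Bool} {l : List Char} {a : Char}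
    (h : a ∈ l) (hp : p a = false) : a ∈ l.dropWhile p := by
  induction l with
  | nil => simp at h
  | cons b t ih =>
    by_cases hb : p b
    · rw [List.dropWhile_cons_of_pos hb]
      rcases List.mem_cons.mp h with h | h
      · subst h; rw [hb] at hp; simp at hp
      · exact ih h
    · rw [List.dropWhile_cons_of_neg hb]; exact h

theorem pvStrip_ne_nil {z : List Char} {a : Char}
    (ha : a ∈ z) (hs : PySem.Chars.isspace a = false) : PySem.Chars.strip z ≠ [] := by
  have h1 : a ∈ PySem.Chars.lstrip z := pvMem_dropWhile ha hs
  have h2 : a ∈ PySem.Chars.strip z := by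
    simp only [PySem.Chars.strip, PySem.Chars.rstrip]
    rw [List.mem_reverse]
    exact pvMem_dropWhile (by simpa using h1) hs
  intro hc; rw [hc] at h2; simp at h2

-- rstrip decomposition
theorem pvRstrip_spec (cs : List Char) :
    ∃ W, cs = PySem.Chars.rstrip cs ++ W ∧ ∀ a ∈ W, PySem.Chars.isspace a = true := by
  refine ⟨(cs.reverse.takeWhile PySem.Chars.isspace).reverse, ?_, ?_⟩
  · simp only [PySem.Chars.rstrip]
    have h0 := congrArg List.reverse
      (List.takeWhile_append_dropWhile (p := PySem.Chars.isspace) (l := cs.reverse))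
    simp only [List.reverse_append, List.reverse_reverse] at h0
    exact h0.symm
  · intro a ha
    rw [List.mem_reverse] at ha
    exact List.mem_takeWhile_imp ha

theorem pvRstrip_last (cs : List Char) (h : PySem.Chars.rstrip cs ≠ []) :
    PySem.Chars.isspace ((PySem.Chars.rstrip cs).getLast h) = false := by
  cases hd : cs.reverse.dropWhile PySem.Chars.isspace with
  | nil => simp [PySem.Chars.rstrip, hd] at h
  | cons b t =>
    have hne : cs.reverse.dropWhile PySem.Chars.isspace ≠ [] := by simp [hd]
    have hb := List.head_dropWhile_not (p := PySem.Chars.isspace) (l := cs.reverse) hne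
    have hbb : PySem.Chars.isspace b = false := by
      have hh : (cs.reverse.dropWhile PySem.Chars.isspace).head hne = b := by
        simp [hd]
      rw [hh] at hb
      exact hb
    have hgl : (PySem.Chars.rstrip cs).getLast h = b := by
      simp only [PySem.Chars.rstrip, hd]
      rw [List.getLast_eq_iff_getLast?_eq_some]
      simp
    rw [hgl]
    exact hbb

-- last-occurrence decomposition
theorem pvLast_occ {z : List Char} (h : '\n' ∈ z) :
    ∃ x y, z = x ++ '\n' :: y ∧ '\n' ∉ y := by
  induction z with
  | nil => simp at h
  | cons a t ih =>
    by_cases ht : '\n' ∈ t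
    · obtain ⟨x, y, hxy, hy⟩ := ih ht
      exact ⟨a :: x, y, by simp [hxy], hy⟩
    · have ha : a = '\n' := by
        rcases List.mem_cons.mp h with h | h
        · exact h.symm
        · exact absurd h ht
      exact ⟨[], t, by simp [ha], ht⟩

-- singleton prefix
theorem pvSingleton_prefix {a : Char} {z : List Char} :
    [a] <+: z ↔ ∃ t, z = a :: t := by
  constructor
  · rintro ⟨t, ht⟩; exact ⟨t, ht.symm⟩
  · rintro ⟨t, ht⟩; exact ⟨t, ht.symm⟩

-- rfind lemmas
theorem pvRfind_go_none (s : List Char) (hs : '\n' ∉ s) (j : Nat) :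
    PySem.Chars.rfind.go s ['\n'] j = -1 := by
  induction j with
  | zero =>
    rw [PySem.Chars.rfind.go]
    rw [if_neg]
    intro hc
    rw [List.isPrefixOf_iff_prefix] at hc
    obtain ⟨t, ht⟩ := pvSingleton_prefix.mp hc
    exact hs (by simp [ht])
  | succ j ih =>
    rw [PySem.Chars.rfind.go]
    rw [if_neg, ih]
    intro hc
    rw [List.isPrefixOf_iff_prefix] at hc
    obtain ⟨t, ht⟩ := pvSingleton_prefix.mp hc
    have : '\n' ∈ s.drop (j+1) := by simp [ht]
    exact hs (List.mem_of_mem_drop this)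

theorem pvRfind_no (s : List Char) (hs : '\n' ∉ s) :
    PySem.Chars.rfind s ['\n'] = -1 := by
  rw [PySem.Chars.rfind]; exact pvRfind_go_none s hs _

theorem pvRfind_go_at (x y : List Char) (hy : '\n' ∉ y) (j : Nat)
    (hj : x.length ≤ j) :
    PySem.Chars.rfind.go (x ++ '\n' :: y) ['\n'] j = x.length := by
  induction j with
  | zero =>
    have hx : x.length = 0 := by omega
    have hx' : x = [] := List.length_eq_zero_iff.mp hx
    subst hx'
    rw [PySem.Chars.rfind.go]
    simp [List.isPrefixOf_iff_prefix, List.cons_prefix_cons]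
  | succ j ih =>
    by_cases he : x.length = j + 1
    · rw [PySem.Chars.rfind.go, if_pos]
      · omega
      · rw [List.isPrefixOf_iff_prefix]
        have : (x ++ '\n' :: y).drop (j + 1) = '\n' :: y := by
          rw [← he]; simp
        rw [this]
        simp
    · have hj' : x.length ≤ j := by omega
      rw [PySem.Chars.rfind.go, if_neg, ih hj']
      rw [List.isPrefixOf_iff_prefix]
      intro hc
      obtain ⟨t, ht⟩ := pvSingleton_prefix.mp hc
      have hd : (x ++ '\n' :: y).drop (j + 1) = y.drop (j - x.length) := by
        rw [List.drop_append]
        have h1 : x.drop (j+1) = [] := by simp; omega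
        rw [h1]
        simp only [List.nil_append]
        have : j + 1 - x.length = (j - x.length) + 1 := by omega
        rw [this, List.drop_succ_cons]
      rw [hd] at ht
      refine hy (List.mem_of_mem_drop (i := j - x.length) ?_)
      rw [← ht.symm]
      exact List.mem_cons_self

theorem pvRfind_at (x y : List Char) (hy : '\n' ∉ y) :
    PySem.Chars.rfind (x ++ '\n' :: y) ['\n'] = x.length := by
  rw [PySem.Chars.rfind]
  exact pvRfind_go_at x y hy _ (by simp)

-- find lemmas
theorem pvFind_no (z : List Char) (h : '\n' ∉ z) :
    PySem.Chars.find z ['\n'] = -1 := by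
  rw [PySem.Chars.find_eq_neg_one_iff]
  rw [List.singleton_infix_iff]
  exact h

theorem pvFind_at (x y : List Char) (hx : '\n' ∉ x) :
    PySem.Chars.find (x ++ '\n' :: y) ['\n'] = x.length := by
  have hinf : ['\n'] <:+: (x ++ '\n' :: y) := by
    rw [List.singleton_infix_iff]; simp
  have hnn : 0 ≤ PySem.Chars.find (x ++ '\n' :: y) ['\n'] :=
    (PySem.Chars.find_nonneg_iff _ _).mpr hinf
  obtain ⟨h1, h2⟩ := PySem.Chars.find_spec hnn
  set f := PySem.Chars.find (x ++ '\n' :: y) ['\n'] with hf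
  have hle : f.toNat ≤ x.length := by
    by_contra hgt
    refine h2 x.length (by omega) ?_
    have hdl : (x ++ '\n' :: y).drop x.length = '\n' :: y := by simp
    rw [hdl]
    exact pvSingleton_prefix.mpr ⟨y, rfl⟩
  have hge : x.length ≤ f.toNat := by
    by_contra hlt
    push_neg at hlt
    obtain ⟨t, ht⟩ := pvSingleton_prefix.mp h1
    have : '\n' ∈ x := by
      have hd : (x ++ '\n' :: y).drop f.toNat = x.drop f.toNat ++ '\n' :: y := by
        rw [List.drop_append_of_le_length (by omega)]
      rw [hd] at ht
      have hne : x.drop f.toNat ≠ [] := by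
        simp [List.drop_eq_nil_iff]; omega
      cases hxd : x.drop f.toNat with
      | nil => exact absurd hxd hne
      | cons b s =>
        rw [hxd] at ht
        simp at ht
        have : b = '\n' := ht.1
        subst this
        exact List.mem_of_mem_drop (i := f.toNat)
          (by rw [hxd]; exact List.mem_cons_self)
    exact hx this
  omega

-- downward range
def pvDownFrom : Nat → List Int
  | 0 => []
  | n + 1 => (n : Int) :: pvDownFrom n

theorem pvDownFrom_eq_map (m : Nat) :
    pvDownFrom m = (List.range m).map (fun k : Nat => (m : Int) - 1 - (k : Int)) := by
  induction m with
  | zero => rfl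
  | succ m ih =>
    rw [List.range_succ_eq_map]
    simp only [pvDownFrom, List.map_cons, List.map_map]
    congr 1
    · push_cast; ring
    · rw [ih]
      apply List.map_congr_left
      intro k _
      simp only [Function.comp]
      push_cast; ring

theorem pvPyRange_down (m : Nat) :
    PySem.List.pyRange ((m : Int) - 1) (-1) (-1) = pvDownFrom m := by
  rw [PySem.List.pyRange]
  rw [if_neg (by norm_num)]
  cases m with
  | zero => simp [pvDownFrom]
  | succ n =>
    have h1 : ¬ (0:Int) < -1 := by norm_num
    have h2 : (-1:Int) < (n+1:Nat) - 1 := by push_cast; omega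
    simp only [h1, if_false, if_pos h2]
    have hc : ((((n+1:Nat):Int) - 1 - (-1) + (-(-1)) - 1) / (-(-1))).toNat = n + 1 := by
      push_cast; norm_num
    rw [hc, pvDownFrom_eq_map]
    apply List.map_congr_left
    intro k _
    push_cast; ring

-- pyGetD helpers
theorem pvPyGetD_cases {α : Type} (xs : List α) (i : Int) (d : α) :
    PySem.List.pyGetD xs i d = d ∨ PySem.List.pyGetD xs i d ∈ xs := by
  by_cases h : PySem.Raise.InRange xs.length i
  · exact Or.inr (PySem.List.pyGetD_mem xs d h)
  · exact Or.inl (PySem.List.pyGetD_of_none xs i d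
      ((PySem.List.pyGet?_eq_none_iff xs i).mpr h))

theorem pvGetD_mid (front back : List (List Char)) (L : List Char) :
    (front ++ L :: back).getD front.length [] = L := by
  induction front with
  | nil => rfl
  | cons f fs ih => simpa using ih

theorem pvSet_mid {α : Type} (front back : List α) (L v : α) :
    (front ++ L :: back).set front.length v = front ++ v :: back := by
  induction front with
  | nil => rfl
  | cons f fs ih => simpa using ih

theorem pvPySetD_natCast {α : Type} (xs : List α) (n : Nat) (v : α) (h : n < xs.length) :
    PySem.List.pySetD xs (n : Int) v = xs.set n v := by
  simp [PySem.List.pySetD, PySem.List.pySet?, PySem.List.pyIdx?, h]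

-- loop lemmas
theorem pvLoop_none (lines : List (List Char))
    (h : ∀ l ∈ lines, PySem.Chars.strip l = []) (r : List Int) :
    pvLastIdxLoop lines r = none := by
  induction r with
  | nil => rfl
  | cons i rest ih =>
    rw [pvLastIdxLoop]
    rw [if_neg, ih]
    simp only [ne_eq, not_not]
    rcases pvPyGetD_cases lines i [] with hc | hc
    · rw [hc]; exact pvStrip_eq_nil [] (by simp)
    · exact h _ hc

theorem pvLoop_finds (front back : List (List Char)) (L : List Char)
    (hL : PySem.Chars.strip L ≠ [])
    (hback : ∀ b ∈ back, PySem.Chars.strip b = [])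
    (m : Nat) (hm1 : front.length < m) (hm2 : m ≤ front.length + 1 + back.length) :
    pvLastIdxLoop (front ++ L :: back) (pvDownFrom m) = some (front.length : Int) := by
  induction m with
  | zero => omega
  | succ n ih =>
    rw [pvDownFrom, pvLastIdxLoop]
    by_cases he : n = front.length
    · subst he
      have hget : PySem.List.pyGetD (front ++ L :: back) ((front.length : Nat) : Int) []
          = L := by
        rw [PySem.List.pyGetD_natCast, pvGetD_mid]
      rw [if_pos (by rw [hget]; exact hL)]
    · have hgt : front.length < n := by omega
      rw [if_neg, ih (by omega) (by omega)]
      simp only [ne_eq, not_not]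
      rw [PySem.List.pyGetD_natCast]
      by_cases hn : n < (front ++ L :: back).length
      · have hfl : front.length ≤ n := by omega
        have hk : n - front.length = (n - front.length - 1) + 1 := by omega
        rw [List.getD_eq_getElem?_getD, List.getElem?_append_right hfl, hk,
          List.getElem?_cons_succ]
        have hk2 : n - front.length - 1 < back.length := by
          simp only [List.length_append, List.length_cons] at hn; omega
        rw [List.getElem?_eq_getElem hk2]
        simp only [Option.getD_some]
        exact hback _ (List.getElem_mem _)
      · rw [List.getD_eq_default _ _ (by omega)]
        exact pvStrip_eq_nil [] (by simp)

-- ===== VERDICT (by name: the statement is the Claim_ definition above) =====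
theorem replace_final_return_spec : Claim_equal_replace_final_return := by
  intro text replacement _
  unfold Spec_replace_final_return
  by_cases hb : PySem.Chars.rstrip text.toList = []
  · -- the whole text is whitespace: both sides return text unchanged
    have hB : replace_final_return_alt text replacement = text := by
      simp only [replace_final_return_alt]
      rw [if_pos hb]
    obtain ⟨W, hW, hWs⟩ := pvRstrip_spec text.toList
    rw [hb, List.nil_append] at hW
    have hblank : ∀ l ∈ pvSpl text.toList, PySem.Chars.strip l = [] := by
      intro l hl
      exact pvStrip_eq_nil l (fun a ha => hWs a (hW ▸ pvMem_mem_spl hl ha))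
    have hA : replace_final_return text replacement = text := by
      simp only [replace_final_return]
      rw [pvSplitOn_eq_spl, pvLoop_none _ hblank]
      rfl
    rw [hA, hB]
  · obtain ⟨W, hW, hWs⟩ := pvRstrip_spec text.toList
    have hlast := pvRstrip_last text.toList hb
    -- split the stripped text at its last newline
    have hPL : ∃ P L0, PySem.Chars.rstrip text.toList = P ++ L0 ∧ '\n' ∉ L0 ∧
        (P = [] ∨ ∃ P0, P = P0 ++ ['\n']) ∧
        PySem.Chars.rfind (PySem.Chars.rstrip text.toList) ['\n'] = (P.length : Int) - 1 := by
      by_cases hnl : '\n' ∈ PySem.Chars.rstrip text.toList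
      · obtain ⟨P0, L0, hsplit, hnl0⟩ := pvLast_occ hnl
        refine ⟨P0 ++ ['\n'], L0, by simp [hsplit], hnl0, Or.inr ⟨P0, rfl⟩, ?_⟩
        rw [hsplit, pvRfind_at P0 L0 hnl0, List.length_append]
        simp only [List.length_cons, List.length_nil]
        push_cast
        omega
      · exact ⟨[], PySem.Chars.rstrip text.toList, by simp, hnl, Or.inl rfl,
          by rw [pvRfind_no _ hnl]; simp⟩
    obtain ⟨P, L0, hbPL, hnlL0, hPcase, hrfind⟩ := hPL
    have hL0ne : L0 ≠ [] := by
      intro hc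
      subst hc
      rw [List.append_nil] at hbPL
      rcases hPcase with h0 | ⟨P0, hP0⟩
      · rw [h0] at hbPL; exact hb hbPL
      · have hEq : PySem.Chars.rstrip text.toList = P0 ++ ['\n'] := by
          rw [hbPL, hP0]
        have hgl : (PySem.Chars.rstrip text.toList).getLast hb
            = (P0 ++ ['\n']).getLast (by simp) := List.getLast_congr _ _ hEq
        have hv : (P0 ++ ['\n']).getLast (by simp) = '\n' := by simp
        rw [hgl, hv] at hlast
        exact absurd hlast (by decide)
    have hPL0ne : P ++ L0 ≠ [] := by simp [hL0ne]
    have hglast : (PySem.Chars.rstrip text.toList).getLast hb = L0.getLast hL0ne := by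
      rw [List.getLast_congr hb hPL0ne hbPL]
      exact List.getLast_append_of_ne_nil hPL0ne hL0ne
    have hlastL0 : PySem.Chars.isspace (L0.getLast hL0ne) = false := by
      rw [← hglast]
      exact hlast
    -- split the trailing whitespace at its first newline
    obtain ⟨hW12, hnlW1, hW2c⟩ :
        W = W.takeWhile (fun a => a != '\n') ++ W.dropWhile (fun a => a != '\n') ∧
        '\n' ∉ W.takeWhile (fun a => a != '\n') ∧
        (W.dropWhile (fun a => a != '\n') = [] ∨
          ∃ W3, W.dropWhile (fun a => a != '\n') = '\n' :: W3) := by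
      refine ⟨(List.takeWhile_append_dropWhile).symm, ?_, ?_⟩
      · intro hc
        have := List.mem_takeWhile_imp hc
        simp at this
      · cases hw2 : W.dropWhile (fun a => a != '\n') with
        | nil => exact Or.inl rfl
        | cons h3 t3 =>
          refine Or.inr ⟨t3, ?_⟩
          have hne : W.dropWhile (fun a => a != '\n') ≠ [] := by simp [hw2]
          have hh := List.head_dropWhile_not (p := fun a => a != '\n') (l := W) hne
          have h3eq : h3 = '\n' := by
            have : (W.dropWhile (fun a => a != '\n')).head hne = h3 := by simp [hw2]
            rw [this] at hh
            simpa using hh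
          rw [h3eq]
    set W1 := W.takeWhile (fun a => a != '\n') with hW1def
    set W2 := W.dropWhile (fun a => a != '\n') with hW2def
    set L := L0 ++ W1 with hLdef
    have hnlL : '\n' ∉ L := by
      intro hc
      rcases List.mem_append.mp hc with h | h
      · exact hnlL0 h
      · exact hnlW1 h
    have hcs : text.toList = P ++ (L ++ W2) := by
      rw [hW, hbPL]
      conv_lhs => rw [hW12]
      simp [hLdef, List.append_assoc]
    have hlen : text.toList.length = P.length + (L.length + W2.length) := by
      rw [hcs]; simp
    have hstart : PySem.Chars.rfind (PySem.Chars.rstrip text.toList) ['\n'] + 1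
        = ((P.length : Nat) : Int) := by rw [hrfind]; ring
    have hPle : P.length ≤ text.toList.length := by omega
    have hdropP : text.toList.drop P.length = L ++ W2 := by
      rw [hcs, List.drop_append]
      simp
    have hW3ws : ∀ a ∈ W2, PySem.Chars.isspace a = true := by
      intro a ha
      apply hWs
      rw [hW12]
      exact List.mem_append_right _ ha
    have hend : (if PySem.Chars.findFrom text.toList ['\n'] ((P.length : Nat) : Int) = -1
          then PySem.List.len text.toList
          else PySem.Chars.findFrom text.toList ['\n'] ((P.length : Nat) : Int))
        = ((P.length + L.length : Nat) : Int) := by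
      rw [PySem.Chars.findFrom_natCast _ _ P.length hPle, hdropP]
      rcases hW2c with h2 | ⟨W3, h3⟩
      · rw [h2, List.append_nil, pvFind_no L hnlL]
        rw [if_pos rfl, if_pos rfl, PySem.List.len_eq]
        have : text.toList.length = P.length + L.length := by
          rw [hlen, h2]; simp
        rw [this]
      · rw [h3, pvFind_at L W3 hnlL]
        rw [if_neg (by omega), if_neg (by omega)]
        push_cast
        ring
    have hseg : PySem.List.slice text.toList (some ((P.length : Nat) : Int))
        (some ((P.length + L.length : Nat) : Int)) = L := by
      rw [PySem.List.slice_natCast, hdropP]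
      have h6 : P.length + L.length - P.length = L.length := by omega
      rw [h6, List.take_left]
    -- the line list decomposes as front ++ L :: back
    have hmid : ∃ back, pvSpl (L ++ W2) = L :: back ∧
        (∀ b ∈ back, PySem.Chars.strip b = []) ∧
        (∀ X : List Char, PySem.Chars.join ['\n'] (X :: back) = X ++ W2) := by
      rcases hW2c with h2 | ⟨W3, h3⟩
      · refine ⟨[], ?_, by simp, ?_⟩
        · rw [h2, List.append_nil, pvSpl_no_nl L hnlL]
        · intro X
          rw [h2]
          simp [PySem.Chars.join, List.intercalate]
      · refine ⟨pvSpl W3, ?_, ?_, ?_⟩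
        · rw [h3, pvSpl_append L W3, pvSpl_no_nl L hnlL]
          rfl
        · intro b hbmem
          apply pvStrip_eq_nil
          intro a ha
          apply hW3ws
          rw [h3]
          exact List.mem_cons_of_mem _ (pvMem_mem_spl hbmem ha)
        · intro X
          have hj := pvJoin_append [X] (pvSpl W3) (by simp) (pvSpl_ne_nil W3)
          have hx : PySem.Chars.join ['\n'] [X] = X := by
            simp [PySem.Chars.join, List.intercalate]
          rw [List.singleton_append] at hj
          rw [hj, hx, pvJoin_spl, h3]
    obtain ⟨back, hmid1, hmid2, hmid3⟩ := hmid
    have hfront : ∃ front : List (List Char), pvSpl text.toList = front ++ L :: back ∧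
        (∀ rest : List (List Char), rest ≠ [] →
          PySem.Chars.join ['\n'] (front ++ rest) = P ++ PySem.Chars.join ['\n'] rest) := by
      rcases hPcase with h0 | ⟨P0, hP0⟩
      · refine ⟨[], ?_, ?_⟩
        · rw [hcs, h0, List.nil_append, hmid1]
          rfl
        · intro rest _
          rw [h0]
          simp
      · refine ⟨pvSpl P0, ?_, ?_⟩
        · rw [hcs, hP0]
          have hsh : (P0 ++ ['\n']) ++ (L ++ W2) = P0 ++ '\n' :: (L ++ W2) := by simp
          rw [hsh, pvSpl_append, hmid1]
        · intro rest hrest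
          rw [pvJoin_append (pvSpl P0) rest (pvSpl_ne_nil P0) hrest, pvJoin_spl, hP0]
          simp
    obtain ⟨front, hlines, hjoinfront⟩ := hfront
    have hstripL : PySem.Chars.strip L ≠ [] :=
      pvStrip_ne_nil (List.mem_append_left _ (List.getLast_mem hL0ne)) hlastL0
    have hloop : pvLastIdxLoop (pvSpl text.toList)
        (PySem.List.pyRange (PySem.List.len (pvSpl text.toList) - 1) (-1) (-1))
        = some ((front.length : Nat) : Int) := by
      rw [PySem.List.len_eq, pvPyRange_down, hlines]
      exact pvLoop_finds front back L hstripL hmid2 _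
        (by simp only [List.length_append, List.length_cons]; omega)
        (by simp only [List.length_append, List.length_cons]; omega)
    have hline : PySem.List.pyGetD (pvSpl text.toList) ((front.length : Nat) : Int) [] = L := by
      rw [PySem.List.pyGetD_natCast, hlines, pvGetD_mid]
    by_cases hret : PySem.Chars.startswith L "return".toList = true
    · obtain ⟨tl, htl⟩ := (PySem.Chars.startswith_iff L _).mp hret
      have hLlen : 6 ≤ L.length := by
        rw [← htl]
        simp
      have hLsp : PySem.Chars.startswith L " ".toList = false := by
        rw [← htl]; rfl
      have hLtab : PySem.Chars.startswith L "\t".toList = false := by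
        rw [← htl]; rfl
      have hA : replace_final_return text replacement
          = String.ofList (P ++ ((replacement.toList ++ L.drop 6) ++ W2)) := by
        simp only [replace_final_return]
        rw [pvSplitOn_eq_spl, hloop]
        show String.ofList (PySem.Chars.join ['\n'] _) = _
        rw [hline, hret, hLsp, hLtab]
        simp only [Bool.or_self, Bool.not_false, Bool.and_true, if_true]
        rw [PySem.List.slice_from L (by norm_num)]
        have h6 : ((6 : Int)).toNat = 6 := rfl
        rw [h6]
        rw [pvPySetD_natCast _ _ _ (by rw [hlines]; simp), hlines, pvSet_mid]
        rw [hjoinfront _ (by simp), hmid3]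
      have hB : replace_final_return_alt text replacement
          = String.ofList (P ++ (replacement.toList ++ (L.drop 6 ++ W2))) := by
        simp only [replace_final_return_alt]
        rw [if_neg hb, hstart, hend, hseg, if_pos hret]
        congr 1
        have hp1 : PySem.List.slice text.toList none (some ((P.length : Nat) : Int)) = P := by
          rw [PySem.List.slice_to _ (by positivity)]
          simp only [Int.toNat_natCast]
          rw [hcs, List.take_left]
        have hp2 : PySem.List.slice text.toList (some (((P.length : Nat) : Int) + 6))
            (some ((P.length + L.length : Nat) : Int)) = L.drop 6 := by
          have hc6 : ((P.length : Nat) : Int) + 6 = ((P.length + 6 : Nat) : Int) := by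
            push_cast; ring
          rw [hc6, PySem.List.slice_natCast]
          have hd6 : text.toList.drop (P.length + 6) = L.drop 6 ++ W2 := by
            rw [hcs, List.drop_append, List.drop_append]
            have e1 : P.drop (P.length + 6) = [] := by simp
            have e2 : P.length + 6 - P.length = 6 := by omega
            have e3 : 6 - L.length = 0 := by omega
            rw [e1, e2, e3]
            simp
          have e4 : P.length + L.length - (P.length + 6) = L.length - 6 := by omega
          rw [e4, hd6]
          have e5 : L.length - 6 = (L.drop 6).length := by simp
          rw [e5, List.take_left]
        have hp3 : PySem.List.slice text.toList (some ((P.length + L.length : Nat) : Int)) none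
            = W2 := by
          rw [PySem.List.slice_from _ (by positivity)]
          simp only [Int.toNat_natCast]
          rw [hcs, List.drop_append, List.drop_append]
          have e1 : P.drop (P.length + L.length) = [] := by simp
          have e2 : P.length + L.length - P.length = L.length := by omega
          have e3 : L.length - L.length = 0 := by omega
          rw [e1, e2, e3]
          simp
        rw [hp1, hp2, hp3]
        simp [List.append_assoc]
      rw [hA, hB]
      simp [List.append_assoc]
    · have hretf : PySem.Chars.startswith L "return".toList = false :=
        Bool.eq_false_iff.mpr hret
      have hA : replace_final_return text replacement = text := by
        simp only [replace_final_return]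
        rw [pvSplitOn_eq_spl, hloop]
        show String.ofList (PySem.Chars.join ['\n'] _) = _
        rw [hline, hretf]
        simp only [Bool.false_and]
        rw [if_neg (by simp), pvJoin_spl]
        exact String.ofList_toList
      have hB : replace_final_return_alt text replacement = text := by
        simp only [replace_final_return_alt]
        rw [if_neg hb, hstart, hend, hseg, if_neg (by rw [hretf]; simp)]
      rw [hA, hB]
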